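-- pv_equiv track=rewrite | github.com/Piotreqsl/ASD | dynamic/opt_sum.py | opt_sum
-- ===== SOURCE A (Python) =====
-- def opt_sum(T):
--     def MinAbsVal(a,b):
--         if abs(a) < abs(b) :
--             return a
--         else:
--             return b
--
--     def MaxAbsVal(a,b):
--         if abs(a) > abs(b) :
--             return a
--         else:
--             return b
--
--     n = len(T)
--     addedSums = [0] * (n + 1)
--
--     #dodajemy do obecnej wartosci wartosc wszystkich poprzednich
--     for i in range(1,n + 1):
--         addedSums[i] = addedSums[i - 1] + T[i - 1]
--
--     DP = [[0 for _ in range(n)] for _ in range(n)]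
--     # w DP[i][j] zapamiętujemy wartość sumy tymczasowej, której wartość bezwzględna
--     # na danym przedziale jest minimalna (z maksymalnych)
--
--     # rozważamy coraz dłuższe przedziały
--     for length in  range(1,n):
--         for start in range(n - length):
--             end = start + length
--             DP[start][end] = addedSums[end + 1] - addedSums[start]
--             # dla każdego przedziału sprawdzamy, które 2 podprzedziały najlepiej
--             # dodać do siebie (tak, by max suma tymczasowa była jak najmniejsza)
--             # k jest "punktem podziału", bierzemy przedziały [start,k] oraz [k+1,end]
--             best = float("inf")
--             for podzial in range(start,end):
--                 best = MinAbsVal(MaxAbsVal(DP[start][podzial], DP[podzial+1][end]), best)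
--
--             # do DP wpisujemy wartość z najlepszego podziału lub sumę całego przedziału,
--             # jeśli jej wartość bezwzględna jest większa
--
--             DP[start][end]= MaxAbsVal(best,DP[start][end])
--
--     return abs(DP[0][n-1])
-- ===== SOURCE B (Python) =====
-- def opt_sum(T):
--     # top-down memoized recursion over intervals instead of A's bottom-up length/start table
--     def MinAbsVal(a, b):
--         if abs(a) < abs(b):
--             return a
--         else:
--             return b
--
--     def MaxAbsVal(a, b):
--         if abs(a) > abs(b):
--             return a
--         else:
--             return b
--
--     n = len(T)
--     addedSums = [0] * (n + 1)
--     for i in range(1, n + 1):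
--         addedSums[i] = addedSums[i - 1] + T[i - 1]
--
--     memo = {}
--
--     def f(i, j):
--         if i == j:
--             return 0
--         if (i, j) in memo:
--             return memo[(i, j)]
--         total = addedSums[j + 1] - addedSums[i]
--         best = None
--         for k in range(i, j):
--             cand = MaxAbsVal(f(i, k), f(k + 1, j))
--             if best is None:
--                 best = cand
--             else:
--                 best = MinAbsVal(cand, best)
--         res = MaxAbsVal(best, total)
--         memo[(i, j)] = res
--         return res
--
--     return abs(f(0, n - 1))
-- ===== Notes on version B (the rewrite author's own statement) =====
-- stated objective: alternative
-- what changed: Replaced the bottom-up length/start double loop filling a 2D DP table with a top-down memoized recursion f(i,j) over intervals (dict memo), keeping the same recurrence and tie behaviour; Pre_ excludes only the empty list, on which A raises IndexError (B also raises there, a TypeError).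
import Mathlib
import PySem

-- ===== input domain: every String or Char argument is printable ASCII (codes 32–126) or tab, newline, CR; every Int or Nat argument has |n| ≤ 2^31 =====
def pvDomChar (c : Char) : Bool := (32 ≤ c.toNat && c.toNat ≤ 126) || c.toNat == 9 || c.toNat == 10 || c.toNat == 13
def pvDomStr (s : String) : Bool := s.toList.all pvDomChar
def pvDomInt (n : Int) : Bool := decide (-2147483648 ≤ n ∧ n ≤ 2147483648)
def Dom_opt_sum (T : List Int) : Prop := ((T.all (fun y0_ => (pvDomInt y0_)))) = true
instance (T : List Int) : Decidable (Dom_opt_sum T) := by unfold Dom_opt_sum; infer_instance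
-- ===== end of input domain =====

-- B replaces A's bottom-up length/start DP-table loops with a top-down memoized recursion over intervals (alternative decomposition, same cost).

-- ===== PORT A =====
-- MaxAbsVal / MinAbsVal; A initializes best = float("inf"), modelled as Option Int with none = inf
-- (MinAbsVal(cand, inf) always returns cand since |cand| < inf).
def pvMaxAbs (a b : Int) : Int := if |a| > |b| then a else b

def pvMinAbsOpt (cand : Int) (best : Option Int) : Option Int :=
  match best with
  | none => some cand
  | some b => if |cand| < |b| then some cand else some b

-- addedSums: the exact assignment loop of A (B's Python builds it with the same loop)
def pvAddedSums (T : List Int) : List Int :=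
  (List.range' 1 T.length).foldl
    (fun S i => S.set i (S.getD (i - 1) 0 + T.getD (i - 1) 0))
    (List.replicate (T.length + 1) 0)

-- DP[s][e]; all accesses made by A are in range on its non-empty domain
def pvDPv (DP : List (List Int)) (s e : Nat) : Int := (DP.getD s []).getD e 0

-- body of A's inner 'for start in range(n - length)' loop, step for step
def pvBody (S : List Int) (length : Nat) (DP : List (List Int)) (start : Nat) : List (List Int) :=
  let e := start + length
  -- DP[start][end] = addedSums[end + 1] - addedSums[start]
  let DP1 := DP.set start ((DP.getD start []).set e (S.getD (e + 1) 0 - S.getD start 0))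
  -- best = inf; for podzial in range(start, end): best = MinAbsVal(MaxAbsVal(DP[start][podzial], DP[podzial+1][end]), best)
  let best := (List.range' start length).foldl
    (fun b k => pvMinAbsOpt (pvMaxAbs (pvDPv DP1 start k) (pvDPv DP1 (k + 1) e)) b) none
  -- DP[start][end] = MaxAbsVal(best, DP[start][end])  (best = inf is unreachable: length ≥ 1)
  let v := match best with
           | none => pvDPv DP1 start e
           | some b => pvMaxAbs b (pvDPv DP1 start e)
  DP1.set start ((DP1.getD start []).set e v)

def opt_sum (T : List Int) : Int :=
  let n := T.length
  let addedSums := pvAddedSums T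
  let DP0 : List (List Int) := List.replicate n (List.replicate n 0)
  let DP := (List.range' 1 (n - 1)).foldl
    (fun DP length => (List.range' 0 (n - length)).foldl (pvBody addedSums length) DP) DP0
  |pvDPv DP 0 (n - 1)|

-- ===== PORT B =====
-- memoized f(i, j); the memo dict is threaded through the recursion; fuel bounds the interval length
def pvGoB (S : List Int) : Nat → Nat → Nat → PySem.Dict (Nat × Nat) Int →
    Int × PySem.Dict (Nat × Nat) Int
  | 0, _, _, m => (0, m)          -- unreachable when called with fuel ≥ j - i (i = j is handled below)
  | fuel + 1, i, j, m =>
    if i = j then (0, m)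
    else
      match PySem.Dict.get? m (i, j) with
      | some v => (v, m)
      | none =>
        let total := S.getD (j + 1) 0 - S.getD i 0
        let st := (List.range' i (j - i)).foldl
          (fun (st : Option Int × PySem.Dict (Nat × Nat) Int) k =>
            let r1 := pvGoB S fuel i k st.2
            let r2 := pvGoB S fuel (k + 1) j r1.2
            (pvMinAbsOpt (pvMaxAbs r1.1 r2.1) st.1, r2.2)) (none, m)
        let res := match st.1 with
                   | none => total    -- unreachable inside Pre_ (range(i, j) is nonempty); Python B raises here
                   | some b => pvMaxAbs b total
        (res, PySem.Dict.insert st.2 (i, j) res)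

def opt_sum_alt (T : List Int) : Int :=
  let n := T.length
  let addedSums := pvAddedSums T
  |(pvGoB addedSums n 0 (n - 1) (PySem.Dict.empty)).1|

-- ===== PRECONDITION & SPEC =====
-- Pre_ excludes only the empty list: there A raises IndexError (it indexes an empty DP table) and B raises TypeError.
def Pre_opt_sum (T : List Int) : Prop := T ≠ []
instance (T : List Int) : Decidable (Pre_opt_sum T) := by unfold Pre_opt_sum; infer_instance
def pvWitness_opt_sum : List Int := ([1, -2, 3])

def Spec_opt_sum (T : List Int) (out : Int) : Prop := out = opt_sum_alt T
instance (T : List Int) (out : Int) : Decidable (Spec_opt_sum T out) := by unfold Spec_opt_sum; infer_instance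

-- ===== CLAIM (what is proved, stated in full; the proofs are below) =====
def Claim_equal_opt_sum : Prop := ∀ (T : List Int), Dom_opt_sum T → Pre_opt_sum T → Spec_opt_sum T (opt_sum T)

-- ===== LEMMAS AND PROOFS =====

-- The recurrence both programs implement, written as a pure fuel-indexed recursion:
-- pvG S fuel i j is the common value of DP[i][j] and f(i, j) whenever j - i ≤ fuel.
def pvG (S : List Int) : Nat → Nat → Nat → Int
  | 0, _, _ => 0
  | fuel + 1, i, j =>
    if i = j then 0
    else
      let total := S.getD (j + 1) 0 - S.getD i 0
      let best := (List.range' i (j - i)).foldl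
        (fun b k => pvMinAbsOpt (pvMaxAbs (pvG S fuel i k) (pvG S fuel (k + 1) j)) b) none
      match best with
      | none => total
      | some b => pvMaxAbs b total

theorem pvG_fuel (S : List Int) : ∀ f1 f2 i j, i ≤ j → j - i ≤ f1 → j - i ≤ f2 →
    pvG S f1 i j = pvG S f2 i j := by
  intro f1
  induction f1 with
  | zero =>
    intro f2 i j hij h1 _
    have : i = j := by omega
    subst this
    cases f2 <;> simp [pvG]
  | succ f1' ih =>
    intro f2 i j hij h1 h2
    by_cases he : i = j
    · subst he; cases f2 <;> simp [pvG]
    · have hlt : i < j := lt_of_le_of_ne hij he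
      obtain ⟨f2', rfl⟩ : ∃ k, f2 = k + 1 := ⟨f2 - 1, by omega⟩
      simp only [pvG, if_neg he]
      congr 1
      apply PySem.List.foldl_congr_mem
      intro b k hk
      have hk' : i ≤ k ∧ k < j := by rw [List.mem_range'] at hk; omega
      congr 2
      · exact ih f2' i k hk'.1 (by omega) (by omega)
      · exact ih f2' (k + 1) j (by omega) (by omega) (by omega)

-- ---- B side: the memo is sound and pvGoB computes pvG ----
def pvInv (S : List Int) (m : PySem.Dict (Nat × Nat) Int) : Prop :=
  ∀ p v, PySem.Dict.get? m p = some v → p.1 ≤ p.2 ∧ v = pvG S (p.2 - p.1) p.1 p.2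

theorem pvGoB_fold (S : List Int) (fuel i j : Nat)
    (hrec : ∀ i' j' m, i' ≤ j' → j' - i' ≤ fuel → pvInv S m →
      (pvGoB S fuel i' j' m).1 = pvG S (j' - i') i' j' ∧ pvInv S (pvGoB S fuel i' j' m).2) :
    ∀ (ks : List Nat) (b : Option Int) (m : PySem.Dict (Nat × Nat) Int),
      (∀ k ∈ ks, i ≤ k ∧ k < j ∧ k - i ≤ fuel ∧ j - (k + 1) ≤ fuel) → pvInv S m →
      (ks.foldl (fun (st : Option Int × PySem.Dict (Nat × Nat) Int) k =>
          let r1 := pvGoB S fuel i k st.2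
          let r2 := pvGoB S fuel (k + 1) j r1.2
          (pvMinAbsOpt (pvMaxAbs r1.1 r2.1) st.1, r2.2)) (b, m)).1
        = ks.foldl (fun b k =>
            pvMinAbsOpt (pvMaxAbs (pvG S (k - i) i k) (pvG S (j - (k + 1)) (k + 1) j)) b) b
      ∧ pvInv S (ks.foldl (fun (st : Option Int × PySem.Dict (Nat × Nat) Int) k =>
          let r1 := pvGoB S fuel i k st.2
          let r2 := pvGoB S fuel (k + 1) j r1.2
          (pvMinAbsOpt (pvMaxAbs r1.1 r2.1) st.1, r2.2)) (b, m)).2 := by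
  intro ks
  induction ks with
  | nil => intro b m _ hm; exact ⟨rfl, hm⟩
  | cons k ks ih =>
    intro b m hks hm
    have hk := hks k (List.mem_cons_self ..)
    obtain ⟨h1, hm1⟩ := hrec i k m hk.1 hk.2.2.1 hm
    obtain ⟨h2, hm2⟩ := hrec (k + 1) j (pvGoB S fuel i k m).2 (by omega) hk.2.2.2 hm1
    simp only [List.foldl_cons]
    rw [h1, h2]
    exact ih (pvMinAbsOpt (pvMaxAbs (pvG S (k - i) i k) (pvG S (j - (k + 1)) (k + 1) j)) b)
        (pvGoB S fuel (k + 1) j (pvGoB S fuel i k m).2).2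
        (fun k' hk' => hks k' (List.mem_cons_of_mem _ hk')) hm2

theorem pvGoB_correct (S : List Int) : ∀ fuel i j m, i ≤ j → j - i ≤ fuel → pvInv S m →
    (pvGoB S fuel i j m).1 = pvG S (j - i) i j ∧ pvInv S (pvGoB S fuel i j m).2 := by
  intro fuel
  induction fuel with
  | zero =>
    intro i j m hij hle hm
    have : i = j := by omega
    subst this
    simp only [pvGoB, pvG, Nat.sub_self]
    exact ⟨by trivial, hm⟩
  | succ fuel ih =>
    intro i j m hij hle hm
    by_cases he : i = j
    · subst he
      simp only [pvGoB, if_pos, Nat.sub_self, pvG]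
      exact ⟨by trivial, hm⟩
    · have hlt : i < j := lt_of_le_of_ne hij he
      simp only [pvGoB, if_neg he]
      cases hget : PySem.Dict.get? m (i, j) with
      | some v =>
        have := hm (i, j) v hget
        exact ⟨this.2.symm ▸ rfl, hm⟩
      | none =>
        obtain ⟨hfold, hminv⟩ := pvGoB_fold S fuel i j ih (List.range' i (j - i)) none m
          (by intro k hk; rw [List.mem_range'] at hk; omega) hm
        obtain ⟨d, hd⟩ : ∃ d, j - i = d + 1 := ⟨j - i - 1, by omega⟩
        have hbest : (List.range' i (j - i)).foldl (fun b k =>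
            pvMinAbsOpt (pvMaxAbs (pvG S (k - i) i k) (pvG S (j - (k + 1)) (k + 1) j)) b) none
            = (List.range' i (j - i)).foldl (fun b k =>
            pvMinAbsOpt (pvMaxAbs (pvG S d i k) (pvG S d (k + 1) j)) b) none := by
          apply PySem.List.foldl_congr_mem
          intro b k hk
          rw [List.mem_range'] at hk
          rw [pvG_fuel S (k - i) d i k (by omega) (by omega) (by omega),
              pvG_fuel S (j - (k + 1)) d (k + 1) j (by omega) (by omega) (by omega)]
        have hGeq : pvG S (j - i) i j = match (List.range' i (j - i)).foldl (fun b k =>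
            pvMinAbsOpt (pvMaxAbs (pvG S (k - i) i k) (pvG S (j - (k + 1)) (k + 1) j)) b) none with
            | none => S.getD (j + 1) 0 - S.getD i 0
            | some b => pvMaxAbs b (S.getD (j + 1) 0 - S.getD i 0) := by
          conv_lhs => rw [hd, pvG]
          rw [if_neg he, hbest, hd]
        constructor
        · rw [hfold, ← hGeq]
        · intro p v hp
          rw [PySem.Dict.get?_insert] at hp
          split_ifs at hp with hpe
          · subst hpe
            refine ⟨hij, ?_⟩
            rw [hfold, ← hGeq] at hp
            exact (Option.some_inj.mp hp).symm
          · exact hminv p v hp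

-- ---- A side: getD/set bookkeeping ----
theorem pv_getD_set_self {α : Type} (l : List α) (i : Nat) (a d : α) (h : i < l.length) :
    (l.set i a).getD i d = a := by
  simp [List.getD_eq_getElem?_getD, List.getElem?_set, h]

theorem pv_getD_set_ne {α : Type} (l : List α) (i j : Nat) (a d : α) (h : i ≠ j) :
    (l.set i a).getD j d = l.getD j d := by
  simp [List.getD_eq_getElem?_getD, List.getElem?_set, h]

theorem pvDPv_set (DP : List (List Int)) (s e : Nat) (v : Int) (s' e' : Nat)
    (hs : s < DP.length) (he : e < (DP.getD s []).length) :
    pvDPv (DP.set s ((DP.getD s []).set e v)) s' e'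
      = if s' = s ∧ e' = e then v else pvDPv DP s' e' := by
  unfold pvDPv
  by_cases hss : s' = s
  · subst hss
    rw [pv_getD_set_self _ _ _ _ hs]
    by_cases hee : e' = e
    · subst hee; rw [pv_getD_set_self _ _ _ _ he]; simp
    · rw [pv_getD_set_ne _ _ _ _ _ (fun h => hee h.symm)]; simp [hee]
  · rw [pv_getD_set_ne _ _ _ _ _ (fun h => hss h.symm)]; simp [hss]

def pvShape (n : Nat) (DP : List (List Int)) : Prop :=
  DP.length = n ∧ ∀ r ∈ DP, r.length = n

theorem pvShape_row (n : Nat) (DP : List (List Int)) (h : pvShape n DP) (s : Nat) (hs : s < n) :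
    (DP.getD s []).length = n := by
  have hsl : s < DP.length := by rw [h.1]; omega
  rw [List.getD_eq_getElem _ _ hsl]
  exact h.2 _ (List.getElem_mem _)

theorem pvShape_set (n : Nat) (DP : List (List Int)) (h : pvShape n DP) (s e : Nat) (v : Int)
    (hs : s < n) : pvShape n (DP.set s ((DP.getD s []).set e v)) := by
  refine ⟨by simp [h.1], ?_⟩
  intro r hr
  rcases List.mem_or_eq_of_mem_set hr with hmem | rfl
  · exact h.2 _ hmem
  · rw [List.length_set]; exact pvShape_row n DP h s hs

-- the loop invariants of A's table: pvOK after whole length-rounds, pvOK2 inside a round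
def pvOK (S : List Int) (n L : Nat) (DP : List (List Int)) : Prop :=
  pvShape n DP ∧ ∀ s e, e < n → e - s ≤ L → pvDPv DP s e = pvG S (e - s) s e

def pvOK2 (S : List Int) (n length s0 : Nat) (DP : List (List Int)) : Prop :=
  pvShape n DP ∧ ∀ s e, e < n → (e - s ≤ length - 1 ∨ (e - s = length ∧ s < s0)) →
    pvDPv DP s e = pvG S (e - s) s e

theorem pvBody_step (S : List Int) (n length s0 : Nat) (DP : List (List Int))
    (h1 : 1 ≤ length) (h2 : length ≤ n - 1) (hs0 : s0 < n - length)
    (hok : pvOK2 S n length s0 DP) :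
    pvOK2 S n length (s0 + 1) (pvBody S length DP s0) := by
  have hn : 1 ≤ n := by omega
  have he0 : s0 + length < n := by omega
  have hsn : s0 < n := by omega
  obtain ⟨hsh, hinv⟩ := hok
  have hsl : s0 < DP.length := by rw [hsh.1]; omega
  have hel : s0 + length < (DP.getD s0 []).length := by
    rw [pvShape_row n DP ⟨hsh.1, hsh.2⟩ s0 hsn]; omega
  unfold pvBody
  set e0 := s0 + length with he0def
  set total := S.getD (e0 + 1) 0 - S.getD s0 0 with htot
  set DP1 := DP.set s0 ((DP.getD s0 []).set e0 total) with hDP1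
  have hsh1 : pvShape n DP1 := pvShape_set n DP hsh s0 e0 total hsn
  have hval1 : ∀ s e, pvDPv DP1 s e = if s = s0 ∧ e = e0 then total else pvDPv DP s e := by
    intro s e; exact pvDPv_set DP s0 e0 total s e hsl hel
  obtain ⟨d, hd⟩ : ∃ d, length = d + 1 := ⟨length - 1, by omega⟩
  have hbest : (List.range' s0 length).foldl
      (fun b k => pvMinAbsOpt (pvMaxAbs (pvDPv DP1 s0 k) (pvDPv DP1 (k + 1) e0)) b) none
      = (List.range' s0 (e0 - s0)).foldl
      (fun b k => pvMinAbsOpt (pvMaxAbs (pvG S d s0 k) (pvG S d (k + 1) e0)) b) none := by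
    have hr : e0 - s0 = length := by omega
    rw [hr]
    apply PySem.List.foldl_congr_mem
    intro b k hk
    rw [List.mem_range'] at hk
    have hk1 : pvDPv DP1 s0 k = pvG S d s0 k := by
      rw [hval1, if_neg (by omega), hinv s0 k (by omega) (Or.inl (by omega))]
      exact pvG_fuel S (k - s0) d s0 k (by omega) (by omega) (by omega)
    have hk2 : pvDPv DP1 (k + 1) e0 = pvG S d (k + 1) e0 := by
      rw [hval1, if_neg (by omega), hinv (k + 1) e0 (by omega) (Or.inl (by omega))]
      exact pvG_fuel S (e0 - (k + 1)) d (k + 1) e0 (by omega) (by omega) (by omega)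
    rw [hk1, hk2]
  have hG : pvG S length s0 e0 = match (List.range' s0 (e0 - s0)).foldl
      (fun b k => pvMinAbsOpt (pvMaxAbs (pvG S d s0 k) (pvG S d (k + 1) e0)) b) none with
      | none => total
      | some b => pvMaxAbs b total := by
    conv_lhs => rw [hd, pvG]
    rw [if_neg (by omega)]
  have hde : pvDPv DP1 s0 e0 = total := by rw [hval1, if_pos ⟨rfl, rfl⟩]
  have hsl1 : s0 < DP1.length := by rw [hsh1.1]; omega
  have hel1 : e0 < (DP1.getD s0 []).length := by rw [pvShape_row n DP1 hsh1 s0 hsn]; omega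
  constructor
  · exact pvShape_set n DP1 hsh1 s0 e0 _ hsn
  · intro s e hen hcond
    rw [pvDPv_set DP1 s0 e0 _ s e hsl1 hel1]
    by_cases hse : s = s0 ∧ e = e0
    · rw [if_pos hse, hse.1, hse.2]
      have heq : e0 - s0 = length := by omega
      rw [heq, hG, hbest, hde]
    · rw [if_neg hse, hval1, if_neg hse]
      apply hinv s e hen
      rcases hcond with h | h
      · exact Or.inl h
      · refine Or.inr ⟨h.1, ?_⟩
        rcases Nat.lt_or_ge s s0 with hlt | hge
        · exact hlt
        · exfalso
          have hss : s = s0 := by omega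
          have : e = e0 := by omega
          exact hse ⟨hss, this⟩

theorem pvInner (S : List Int) (n length : Nat) (h1 : 1 ≤ length) (h2 : length ≤ n - 1) :
    ∀ (cnt s0 : Nat) (DP : List (List Int)), s0 + cnt = n - length → pvOK2 S n length s0 DP →
    pvOK2 S n length (n - length) ((List.range' s0 cnt).foldl (pvBody S length) DP) := by
  intro cnt
  induction cnt with
  | zero => intro s0 DP hsum hok; simpa [← hsum] using hok
  | succ cnt ih =>
    intro s0 DP hsum hok
    rw [List.range'_succ, List.foldl_cons]
    exact ih (s0 + 1) _ (by omega) (pvBody_step S n length s0 DP h1 h2 (by omega) hok)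

theorem pvOuter (S : List Int) (n : Nat) :
    ∀ (cnt L0 : Nat) (DP : List (List Int)), 1 ≤ L0 → L0 + cnt ≤ n →
    pvOK S n (L0 - 1) DP →
    pvOK S n (L0 + cnt - 1) ((List.range' L0 cnt).foldl
      (fun DP length => (List.range' 0 (n - length)).foldl (pvBody S length) DP) DP) := by
  intro cnt
  induction cnt with
  | zero => intro L0 DP hL0 hle hok; simpa using hok
  | succ cnt ih =>
    intro L0 DP hL0 hle hok
    rw [List.range'_succ, List.foldl_cons]
    have h2 : L0 ≤ n - 1 := by omega
    have hok2 : pvOK2 S n L0 0 DP := by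
      refine ⟨hok.1, ?_⟩
      intro s e hen hcond
      apply hok.2 s e hen
      rcases hcond with h | h
      · omega
      · omega
    have hres := pvInner S n L0 hL0 h2 (n - L0) 0 DP (by omega) hok2
    have hok' : pvOK S n L0 ((List.range' 0 (n - L0)).foldl (pvBody S L0) DP) := by
      refine ⟨hres.1, ?_⟩
      intro s e hen hle'
      apply hres.2 s e hen
      rcases Nat.lt_or_ge (e - s) L0 with hlt | hge
      · exact Or.inl (by omega)
      · exact Or.inr ⟨by omega, by omega⟩
    have := ih (L0 + 1) _ (by omega) (by omega) (by simpa using hok')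
    have heq : L0 + 1 + cnt - 1 = L0 + (cnt + 1) - 1 := by omega
    rw [heq] at this
    exact this

theorem pvOK_init (S : List Int) (n : Nat) :
    pvOK S n 0 (List.replicate n (List.replicate n 0)) := by
  refine ⟨⟨by simp, by intro r hr; rw [List.eq_of_mem_replicate hr]; simp⟩, ?_⟩
  intro s e hen hle
  have : e - s = 0 := by omega
  rw [this]
  have hz : pvDPv (List.replicate n (List.replicate n 0)) s e = 0 := by
    simp [pvDPv, List.getD_eq_getElem?_getD, List.getElem?_replicate]
    split_ifs <;> simp
  rw [hz]
  simp [pvG]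

-- ===== VERDICT (by name: the statement is the Claim_ definition above) =====
theorem opt_sum_spec : Claim_equal_opt_sum := by
  intro T _ hpre
  unfold Spec_opt_sum
  have hn : 1 ≤ T.length := by
    cases T with
    | nil => exact absurd rfl hpre
    | cons a t => simp
  set n := T.length with hndef
  set S := pvAddedSums T with hSdef
  -- A's table after all rounds agrees with pvG
  have hA := pvOuter S n (n - 1) 1 (List.replicate n (List.replicate n 0)) (by omega)
    (by omega) (pvOK_init S n)
  have hAval : pvDPv ((List.range' 1 (n - 1)).foldl
      (fun DP length => (List.range' 0 (n - length)).foldl (pvBody S length) DP)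
      (List.replicate n (List.replicate n 0))) 0 (n - 1)
      = pvG S (n - 1) 0 (n - 1) := by
    have := hA.2 0 (n - 1) (by omega) (by omega)
    simpa using this
  -- B's memoized recursion computes the same value
  have hB := pvGoB_correct S n 0 (n - 1) PySem.Dict.empty (by omega) (by omega)
    (by intro p v hp; rw [PySem.Dict.get?_empty] at hp; exact absurd hp (by simp))
  have hAeq : opt_sum T = |pvDPv ((List.range' 1 (n - 1)).foldl
      (fun DP length => (List.range' 0 (n - length)).foldl (pvBody S length) DP)
      (List.replicate n (List.replicate n 0))) 0 (n - 1)| := rfl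
  have hBeq : opt_sum_alt T = |(pvGoB S n 0 (n - 1) PySem.Dict.empty).1| := rfl
  rw [hAeq, hBeq, hAval, hB.1]
  simp
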